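-- pv_equiv track=rewrite | github.com/shaden-s/Programming-Challenges | Challenge 12/cardcheck.py | double_list
-- ===== SOURCE A (Python) =====
-- def double_list(num):
--   list = []
--   c = 1
--   while c != len(num)+1:
--     if c % 2:
--       list.append(num[c-1]*2)
--     else:
--       list.append(num[c-1])
--     c += 1
--   return list
-- ===== SOURCE B (Python) =====
-- def double_list(num):
--     res = list(num)
--     for i in range(0, len(res), 2):
--         res[i] = res[i] * 2
--     return res
-- ===== Notes on version B (the rewrite author's own statement) =====
-- stated objective: simpler
-- what changed: A builds a fresh list with a 1-based while-counter and a per-element parity branch; B copies the input with list() and overwrites every even index in one strided range(0,n,2) pass, with no branch and no append.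
import Mathlib
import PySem

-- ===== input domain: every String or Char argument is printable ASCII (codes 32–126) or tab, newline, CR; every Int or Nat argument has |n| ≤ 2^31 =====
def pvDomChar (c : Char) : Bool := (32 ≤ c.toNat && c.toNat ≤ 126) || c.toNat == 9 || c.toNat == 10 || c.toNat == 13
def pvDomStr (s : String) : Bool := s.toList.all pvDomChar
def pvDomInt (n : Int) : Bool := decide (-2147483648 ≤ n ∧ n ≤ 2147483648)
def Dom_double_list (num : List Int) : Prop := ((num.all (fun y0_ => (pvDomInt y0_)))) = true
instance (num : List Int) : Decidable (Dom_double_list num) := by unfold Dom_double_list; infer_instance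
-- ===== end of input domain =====

-- B replaces A's 1-based while-counter with its per-element parity branch by a copy of the
-- input overwritten at every even index in one strided range(0, n, 2) pass (objective: simpler).

-- ===== PORT A =====
-- while c != len(num)+1: if c % 2: list.append(num[c-1]*2) else: list.append(num[c-1]); c += 1
def double_list (num : List Int) : List Int :=
  (PySem.List.pyRange 1 ((num.length : Int) + 1) 1).foldl
    (fun list c =>
      if PySem.Int.mod c 2 ≠ 0 then list ++ [PySem.List.pyGetD num (c - 1) 0 * 2]
      else list ++ [PySem.List.pyGetD num (c - 1) 0]) []

-- ===== PORT B =====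
-- res = list(num); for i in range(0, len(res), 2): res[i] = res[i] * 2; return res
def double_list_alt (num : List Int) : List Int :=
  (PySem.List.pyRange 0 (num.length : Int) 2).foldl
    (fun res i => PySem.List.pySetD res i (PySem.List.pyGetD res i 0 * 2)) num

-- ===== PRECONDITION & SPEC =====
def Spec_double_list (num : List Int) (out : List Int) : Prop := out = double_list_alt num
instance (num : List Int) (out : List Int) : Decidable (Spec_double_list num out) := by unfold Spec_double_list; infer_instance

-- ===== CLAIM (what is proved, stated in full; the proofs are below) =====
def Claim_equal_double_list : Prop := ∀ (num : List Int), Dom_double_list num → Spec_double_list num (double_list num)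

-- ===== LEMMAS AND PROOFS =====

-- common recursive characterisation of both ports: double the head of every pair
def specGo : List Int → List Int
  | [] => []
  | [a] => [a * 2]
  | a :: b :: t => a * 2 :: b :: specGo t

-- the element A's loop body appends for 1-based counter c
def gA (num : List Int) (c : Int) : Int :=
  if PySem.Int.mod c 2 ≠ 0 then PySem.List.pyGetD num (c - 1) 0 * 2
  else PySem.List.pyGetD num (c - 1) 0

lemma gA_one (x : Int) (l : List Int) : gA (x :: l) 1 = x * 2 := by
  unfold gA
  rw [if_pos (by decide)]
  norm_num [PySem.List.pyGetD_zero_cons]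

lemma gA_two (x y : Int) (l : List Int) : gA (x :: y :: l) 2 = y := by
  unfold gA
  rw [if_neg (by decide)]
  rw [show (2:Int) - 1 = 1 by norm_num, PySem.List.pyGetD_of_nonneg _ _ (by norm_num)]
  rfl

lemma gA_shift (a b : Int) (t : List Int) (k : Nat) :
    gA (a :: b :: t) (3 + (k : Int)) = gA t (1 + (k : Int)) := by
  unfold gA
  have hm : PySem.Int.mod (3 + (k:Int)) 2 = PySem.Int.mod (1 + (k:Int)) 2 := by
    rw [PySem.Int.mod_eq_emod_of_pos (by norm_num), PySem.Int.mod_eq_emod_of_pos (by norm_num)]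
    omega
  have hg : PySem.List.pyGetD (a :: b :: t) (3 + (k:Int) - 1) 0 = PySem.List.pyGetD t (1 + (k:Int) - 1) 0 := by
    rw [PySem.List.pyGetD_of_nonneg _ _ (by omega), PySem.List.pyGetD_of_nonneg _ _ (by omega)]
    have h1 : (3 + (k:Int) - 1).toNat = k + 2 := by omega
    have h2 : (1 + (k:Int) - 1).toNat = k := by omega
    rw [h1, h2]
    rfl
  rw [hm, hg]

lemma map_gA_eq_spec (num : List Int) :
    (List.range num.length).map (fun (k : Nat) => gA num (1 + (k : Int))) = specGo num := by
  induction num using specGo.induct with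
  | case1 => rfl
  | case2 a =>
      rw [show ([a] : List Int).length = 1 from rfl, List.range_one]
      simp only [List.map_cons, List.map_nil, Nat.cast_zero, add_zero]
      rw [gA_one]
      rfl
  | case3 a b t ih =>
      have h2 : (a :: b :: t).length = t.length + 1 + 1 := by simp
      rw [h2, List.range_succ_eq_map, List.range_succ_eq_map]
      simp only [List.map_cons, List.map_map, Nat.cast_zero, add_zero]
      rw [show (1 : Int) + ((0:Nat) + 1 : Nat) = 2 by norm_num]
      rw [gA_one, gA_two]
      show _ = a * 2 :: b :: specGo t
      congr 1
      congr 1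
      rw [← ih]
      apply List.map_congr_left
      intro k _
      simp only [Function.comp_apply, Nat.succ_eq_add_one]
      have : (1 : Int) + ((k + 1 + 1 : Nat) : Int) = 3 + (k : Int) := by push_cast; ring
      rw [this, gA_shift]

lemma A_eq_spec (num : List Int) : double_list num = specGo num := by
  unfold double_list
  have hfun : (fun (list : List Int) c =>
      if PySem.Int.mod c 2 ≠ 0 then list ++ [PySem.List.pyGetD num (c - 1) 0 * 2]
      else list ++ [PySem.List.pyGetD num (c - 1) 0])
      = fun list c => list ++ [gA num c] := by
    funext l c
    unfold gA
    split <;> rfl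
  rw [hfun, PySem.List.foldl_append_singleton_eq_map, List.nil_append]
  rw [PySem.List.pyRange_one]
  have hn : ((num.length : Int) + 1 - 1).toNat = num.length := by omega
  rw [hn, List.map_map]
  rw [← map_gA_eq_spec num]
  apply List.map_congr_left
  intro k _
  rfl

-- B's loop body
def updB (res : List Int) (i : Int) : List Int :=
  PySem.List.pySetD res i (PySem.List.pyGetD res i 0 * 2)

lemma pyRange_two_nil (a b : Int) (h : b ≤ a) : PySem.List.pyRange a b 2 = [] := by
  rw [PySem.List.pyRange_of_pos _ _ (by norm_num)]
  simp [not_lt.mpr h]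

lemma pyRange_two_cons (a b : Int) (h : a < b) :
    PySem.List.pyRange a b 2 = a :: PySem.List.pyRange (a + 2) b 2 := by
  rw [PySem.List.pyRange_of_pos _ _ (by norm_num), PySem.List.pyRange_of_pos _ _ (by norm_num)]
  have hc : (if a < b then ((b - a + 2 - 1) / 2).toNat else 0)
      = (if a + 2 < b then ((b - (a + 2) + 2 - 1) / 2).toNat else 0) + 1 := by
    split_ifs <;> omega
  rw [hc, List.range_succ_eq_map]
  simp [List.map_map, Function.comp]
  intro k _
  ring

lemma updB_cons2 (a : Int) (ha : 0 ≤ a) (x y : Int) (l : List Int) :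
    updB (x :: y :: l) (a + 2) = x :: y :: updB l a := by
  unfold updB
  have hg : PySem.List.pyGetD (x :: y :: l) (a + 2) 0 = PySem.List.pyGetD l a 0 := by
    rw [PySem.List.pyGetD_of_nonneg _ _ (by omega), PySem.List.pyGetD_of_nonneg _ _ ha]
    have : (a + 2).toNat = a.toNat + 2 := by omega
    rw [this]; rfl
  rw [hg, PySem.List.pySetD_of_nonneg _ _ (by omega), PySem.List.pySetD_of_nonneg _ _ ha]
  have : (a + 2).toNat = a.toNat + 2 := by omega
  rw [this]; rfl

lemma fold_shift (b a : Int) (ha : 0 ≤ a) (x y : Int) (l : List Int) :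
    (PySem.List.pyRange (a + 2) (b + 2) 2).foldl updB (x :: y :: l)
      = x :: y :: (PySem.List.pyRange a b 2).foldl updB l := by
  by_cases h : a < b
  · rw [pyRange_two_cons (a + 2) (b + 2) (by omega), pyRange_two_cons a b h]
    simp only [List.foldl_cons]
    rw [updB_cons2 a ha]
    exact fold_shift b (a + 2) (by omega) x y (updB l a)
  · rw [pyRange_two_nil _ _ (by omega), pyRange_two_nil _ _ (by omega)]
    rfl
termination_by (b - a).toNat
decreasing_by omega

lemma B_eq_spec (num : List Int) : double_list_alt num = specGo num := by
  show (PySem.List.pyRange 0 (num.length : Int) 2).foldl updB num = specGo num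
  induction num using specGo.induct with
  | case1 => rfl
  | case2 a =>
      rw [show ((([a] : List Int).length : Int)) = 1 by rfl,
        pyRange_two_cons 0 1 (by norm_num), pyRange_two_nil _ _ (by norm_num)]
      simp only [List.foldl_cons, List.foldl_nil]
      unfold updB specGo
      rw [PySem.List.pyGetD_zero_cons, PySem.List.pySetD_of_nonneg _ _ le_rfl]
      rfl
  | case3 a b t ih =>
      have hlen : (((a :: b :: t).length : Int)) = (t.length : Int) + 2 := by
        simp; omega
      rw [hlen, pyRange_two_cons 0 _ (by positivity)]
      simp only [List.foldl_cons]
      have h0 : updB (a :: b :: t) 0 = a * 2 :: b :: t := by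
        unfold updB
        rw [PySem.List.pyGetD_zero_cons, PySem.List.pySetD_of_nonneg _ _ le_rfl]
        rfl
      rw [h0, show (0 : Int) + 2 = 0 + 2 by rfl, fold_shift (t.length : Int) 0 le_rfl]
      rw [ih]
      rfl

-- ===== VERDICT (by name: the statement is the Claim_ definition above) =====
theorem double_list_spec : Claim_equal_double_list := by
  intro num _
  unfold Spec_double_list
  rw [A_eq_spec, B_eq_spec]
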